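-- pv_equiv track=rewrite | github.com/cowerman/python | test_work/te.py | method_2
-- ===== SOURCE A (Python) =====
-- def method_2(value):
--     bit_1_cnt = 0
--     tmp_val = value
--     is_contiguous = False
--
--     if value == 0:
--         is_contiguous = True
--
--     while tmp_val > 0:
--         tmp_val &= (tmp_val - 1)
--         bit_1_cnt += 1
--
--     if bit_1_cnt == 1:
--         is_contiguous = True
--         return is_contiguous
--
--     if value & (value >> 1) > 0:
--         is_contiguous = True
--
--     return is_contiguous
-- ===== SOURCE B (Python) =====
-- def method_2(value):
--     if value == 0:
--         return True
--     if value > 0 and value & (value - 1) == 0: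
--         return True
--     return value & (value >> 1) > 0
-- ===== Notes on version B (the rewrite author's own statement) =====
-- stated objective: simpler
-- what changed: Replaces Brian Kernighan's popcount loop with the closed-form single-bit test (positive and clearing the lowest set bit leaves nothing), turning the function into three loop-free guard returns.
import Mathlib
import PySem

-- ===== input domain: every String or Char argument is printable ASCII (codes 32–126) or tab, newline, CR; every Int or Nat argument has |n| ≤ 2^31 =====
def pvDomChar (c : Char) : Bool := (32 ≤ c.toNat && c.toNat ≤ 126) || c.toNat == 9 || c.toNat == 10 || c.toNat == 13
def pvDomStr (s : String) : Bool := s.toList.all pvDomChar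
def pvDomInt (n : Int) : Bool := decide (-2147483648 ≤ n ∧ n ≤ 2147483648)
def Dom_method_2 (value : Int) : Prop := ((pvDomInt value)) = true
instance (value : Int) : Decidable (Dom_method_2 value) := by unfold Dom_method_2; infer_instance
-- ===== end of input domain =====

-- B drops Brian Kernighan's popcount loop for the closed-form single-bit test value & (value-1) == 0: simpler, loop-free.


-- ===== PORT A =====
-- termination fact for the Kernighan loop: t & (t-1) strictly shrinks toNat while t > 0
theorem method_2_band_lt (t : Int) (h : 0 < t) : (PySem.Int.band t (t - 1)).toNat < t.toNat := by
  rw [PySem.Int.band_of_nonneg (by omega) (by omega)]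
  have := Nat.and_le_right (n := t.toNat) (m := (t - 1).toNat)
  simp only [Int.toNat_natCast]
  omega

-- the while loop: while tmp_val > 0: tmp_val &= tmp_val - 1; bit_1_cnt += 1
def method_2_loop (tmp cnt : Int) : Int :=
  if h : 0 < tmp then method_2_loop (PySem.Int.band tmp (tmp - 1)) (cnt + 1) else cnt
termination_by tmp.toNat
decreasing_by exact method_2_band_lt tmp h

def method_2 (value : Int) : Bool :=
  let is_contiguous := false
  let is_contiguous := if value = 0 then true else is_contiguous
  let bit_1_cnt := method_2_loop value 0
  if bit_1_cnt = 1 then true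
  else if 0 < PySem.Int.band value (value >>> (1 : Nat)) then true
  else is_contiguous

-- ===== PORT B =====
def method_2_alt (value : Int) : Bool :=
  if value = 0 then true
  else if 0 < value ∧ PySem.Int.band value (value - 1) = 0 then true
  else decide (0 < PySem.Int.band value (value >>> (1 : Nat)))

-- ===== PRECONDITION & SPEC =====
def Spec_method_2 (value : Int) (out : Bool) : Prop := out = method_2_alt value
instance (value : Int) (out : Bool) : Decidable (Spec_method_2 value out) := by unfold Spec_method_2; infer_instance

-- ===== CLAIM (what is proved, stated in full; the proofs are below) =====
def Claim_equal_method_2 : Prop := ∀ (value : Int), Dom_method_2 value → Spec_method_2 value (method_2 value)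

-- ===== LEMMAS AND PROOFS =====
theorem method_2_loop_le (tmp cnt : Int) : cnt ≤ method_2_loop tmp cnt := by
  unfold method_2_loop
  split
  · have := method_2_loop_le (PySem.Int.band tmp (tmp - 1)) (cnt + 1); omega
  · omega
termination_by tmp.toNat
decreasing_by exact method_2_band_lt tmp (by assumption)

theorem method_2_loop_nonpos (tmp cnt : Int) (h : tmp ≤ 0) : method_2_loop tmp cnt = cnt := by
  unfold method_2_loop; simp [show ¬ 0 < tmp by omega]

-- the Kernighan count is 1 exactly when value is a positive power of two
theorem method_2_loop_one_iff (value : Int) :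
    method_2_loop value 0 = 1 ↔ (0 < value ∧ PySem.Int.band value (value - 1) = 0) := by
  constructor
  · intro h
    by_cases hv : 0 < value
    · refine ⟨hv, ?_⟩
      rw [method_2_loop] at h
      simp only [hv, dif_pos] at h
      set b := PySem.Int.band value (value - 1) with hb
      have hbn : 0 ≤ b := PySem.Int.band_nonneg_of_nonneg_left _ (by omega)
      by_cases hb0 : 0 < b
      · rw [method_2_loop] at h
        simp only [hb0, dif_pos] at h
        have := method_2_loop_le (PySem.Int.band b (b - 1)) (0 + 1 + 1)
        omega
      · omega
    · rw [method_2_loop_nonpos _ _ (by omega)] at h; omega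
  · rintro ⟨hv, hb⟩
    rw [method_2_loop]
    simp only [hv, dif_pos, hb]
    rw [method_2_loop_nonpos _ _ (by omega)]
    omega

-- ===== VERDICT (by name: the statement is the Claim_ definition above) =====
theorem method_2_spec : Claim_equal_method_2 := by
  intro value _
  unfold Spec_method_2 method_2 method_2_alt
  by_cases h0 : value = 0
  · subst h0
    rw [method_2_loop_nonpos _ _ (by omega)]
    simp
  · simp only [h0, if_false]
    by_cases h1 : method_2_loop value 0 = 1
    · have := (method_2_loop_one_iff value).mp h1
      simp [h1, this]
    · have := (not_iff_not.mpr (method_2_loop_one_iff value)).mp h1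
      simp only [h1, if_false, this, if_false]
      split <;> simp_all
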